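-- pv_equiv track=rewrite | github.com/Motif-Based-Centralities/Centrality-Algorithms | parallel.py | get_u_parts
-- ===== SOURCE A (Python) =====
-- def get_u_parts(u, parts):
--     res = {}
--     for k in parts:
--         if k == u:
--             # agregamos todo lo de este objeto, pues son
--             # particiones que toman como punto de partida a u
--             res[k] = {}
--             for m in parts[k]:
--                 res[k][m] = {}
--                 for n in parts[k][m]:
--                     res[k][m][n] = {}
--                     for o in parts[k][m][n]:
--                         res[k][m][n][o] = set(parts[k][m][n][o])
--         if u in parts[k]:
--             # k es hijo de u y tenemos que copiar solo esa rama
--             res[k] = {u: {}}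
--             for n in parts[k][u]:
--                 res[k][u][n] = {}
--                 for o in parts[k][u][n]:
--                     res[k][u][n][o] = set(parts[k][u][n][o])
--     return res
-- ===== SOURCE B (Python) =====
-- def get_u_parts(u, parts):
--     def copy(d, depth):
--         # depth-limited deep copy: dicts down to `depth` levels, set() at the leaf
--         if depth == 0:
--             return set(d)
--         return {k: copy(c, depth - 1) for k, c in d.items()}
--
--     res = {}
--     for k, v in parts.items():
--         if k == u:
--             res[k] = copy(v, 3)
--         if u in v:
--             res[k] = {u: copy(v[u], 2)}
--     return res
-- ===== Notes on version B (the rewrite author's own statement) =====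
-- stated objective: simpler
-- what changed: The four hand-written nested copy loops are replaced by one depth-limited recursive deep-copy helper (dict comprehension per level, set() at depth 0) applied in the same two-branch top-level loop.
import Mathlib
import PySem

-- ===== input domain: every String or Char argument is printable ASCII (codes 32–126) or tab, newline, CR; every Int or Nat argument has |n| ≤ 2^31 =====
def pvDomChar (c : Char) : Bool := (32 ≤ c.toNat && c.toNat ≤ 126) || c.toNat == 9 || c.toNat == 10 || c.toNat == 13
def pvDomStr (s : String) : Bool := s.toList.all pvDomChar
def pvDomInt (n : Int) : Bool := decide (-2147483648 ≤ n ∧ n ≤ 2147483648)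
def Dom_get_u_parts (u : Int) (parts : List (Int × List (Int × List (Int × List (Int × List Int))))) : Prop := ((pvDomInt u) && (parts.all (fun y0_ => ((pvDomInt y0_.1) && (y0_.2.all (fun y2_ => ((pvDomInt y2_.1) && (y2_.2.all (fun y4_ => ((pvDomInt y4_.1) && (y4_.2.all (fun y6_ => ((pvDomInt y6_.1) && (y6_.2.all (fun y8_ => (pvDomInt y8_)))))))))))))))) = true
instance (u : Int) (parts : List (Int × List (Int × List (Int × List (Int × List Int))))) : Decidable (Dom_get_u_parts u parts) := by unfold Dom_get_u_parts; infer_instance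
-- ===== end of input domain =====

-- B replaces A's four hand-written nested copy loops by a depth-limited recursive
-- deep-copy (a map per level, set() at the leaf); objective: simpler. Same cost.

-- Python dict assignment d[k] = v on an association list: overwrite in place, fresh keys append.
def dinsert {β : Type} (d : List (Int × β)) (k : Int) (v : β) : List (Int × β) :=
  match d with
  | [] => [(k, v)]
  | (k', v') :: t => if k' = k then (k, v) :: t else (k', v') :: dinsert t k v

-- Python dict lookup (first match).
def dget? {β : Type} (d : List (Int × β)) (k : Int) : Option β :=
  match d with
  | [] => none
  | (k', v') :: t => if k' = k then some v' else dget? t k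

-- ===== PORT A =====
def get_u_parts (u : Int) (parts : List (Int × List (Int × List (Int × List (Int × List Int))))) : List (Int × List (Int × List (Int × List (Int × List Int)))) :=
  parts.foldl (fun res kv =>
    let k := kv.1
    -- if k == u: res[k] = {}; then the three nested fill loops
    let res1 := if k = u then
        dinsert res k
          (kv.2.foldl (fun d1 mv =>
             dinsert d1 mv.1
               (mv.2.foldl (fun d2 nv =>
                  dinsert d2 nv.1
                    (nv.2.foldl (fun d3 ov =>
                       dinsert d3 ov.1 (PySem.Set.ofList ov.2)) [])) [])) [])
      else res
    -- if u in parts[k]: res[k] = {u: {}}; then the two nested fill loops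
    match dget? kv.2 u with
    | some vu =>
        dinsert res1 k
          [(u, vu.foldl (fun d2 nv =>
                 dinsert d2 nv.1
                   (nv.2.foldl (fun d3 ov =>
                      dinsert d3 ov.1 (PySem.Set.ofList ov.2)) [])) [])]
    | none => res1) []

-- ===== PORT B =====
-- copy(d, 1): {o: set(c) for o, c in d.items()}
def copy1 (d : List (Int × List Int)) : List (Int × List Int) :=
  d.map (fun p => (p.1, PySem.Set.ofList p.2))
-- copy(d, 2)
def copy2 (d : List (Int × List (Int × List Int))) : List (Int × List (Int × List Int)) :=
  d.map (fun p => (p.1, copy1 p.2))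
-- copy(d, 3)
def copy3 (d : List (Int × List (Int × List (Int × List Int)))) : List (Int × List (Int × List (Int × List Int))) :=
  d.map (fun p => (p.1, copy2 p.2))

def get_u_parts_alt (u : Int) (parts : List (Int × List (Int × List (Int × List (Int × List Int))))) : List (Int × List (Int × List (Int × List (Int × List Int)))) :=
  parts.foldl (fun res kv =>
    let res1 := if kv.1 = u then dinsert res kv.1 (copy3 kv.2) else res
    match dget? kv.2 u with
    | some vu => dinsert res1 kv.1 [(u, copy2 vu)]
    | none => res1) []

-- ===== PRECONDITION & SPEC =====
-- Pre_ excludes association lists with duplicate keys at some dict level: those do not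
-- represent a Python dict (a Python dict cannot hold them), so A's behaviour there is
-- not defined by the source; B's per-level map would keep both copies.
def Pre_get_u_parts (u : Int) (parts : List (Int × List (Int × List (Int × List (Int × List Int))))) : Prop :=
  (parts.map Prod.fst).Nodup ∧
  ∀ p ∈ parts, (p.2.map Prod.fst).Nodup ∧
    ∀ q ∈ p.2, (q.2.map Prod.fst).Nodup ∧
      ∀ r ∈ q.2, (r.2.map Prod.fst).Nodup
instance (u : Int) (parts : List (Int × List (Int × List (Int × List (Int × List Int))))) : Decidable (Pre_get_u_parts u parts) := by unfold Pre_get_u_parts; infer_instance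

def pvWitness_get_u_parts : Int × (List (Int × List (Int × List (Int × List (Int × List Int))))) :=
  (1, [(1, [(2, [(3, [(4, [5, 5, 6])])])]), (7, [(1, [(8, [(9, [10])])])])])

def Spec_get_u_parts (u : Int) (parts : List (Int × List (Int × List (Int × List (Int × List Int))))) (out : List (Int × List (Int × List (Int × List (Int × List Int))))) : Prop := out = get_u_parts_alt u parts
instance (u : Int) (parts : List (Int × List (Int × List (Int × List (Int × List Int))))) (out : List (Int × List (Int × List (Int × List (Int × List Int))))) : Decidable (Spec_get_u_parts u parts out) := by
  unfold Spec_get_u_parts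
  letI h2 : DecidableEq (List (Int × List (Int × List Int))) := inferInstance
  letI h3 : DecidableEq (List (Int × List (Int × List (Int × List Int)))) := inferInstance
  letI h4 : DecidableEq (List (Int × List (Int × List (Int × List (Int × List Int))))) := inferInstance
  exact h4 out (get_u_parts_alt u parts)

-- ===== CLAIM (what is proved, stated in full; the proofs are below) =====
def Claim_equal_get_u_parts : Prop := ∀ (u : Int) (parts : List (Int × List (Int × List (Int × List (Int × List Int))))), Dom_get_u_parts u parts → Pre_get_u_parts u parts → Spec_get_u_parts u parts (get_u_parts u parts)

-- ===== LEMMAS AND PROOFS =====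

theorem dinsert_fresh {β : Type} (d : List (Int × β)) (k : Int) (v : β)
    (h : k ∉ d.map Prod.fst) : dinsert d k v = d ++ [(k, v)] := by
  induction d with
  | nil => rfl
  | cons p t ih =>
    obtain ⟨p1, p2⟩ := p
    simp only [List.map_cons, List.mem_cons, not_or] at h
    have hne : p1 ≠ k := fun e => h.1 e.symm
    simp only [dinsert, if_neg hne, List.cons_append]
    rw [ih h.2]

-- A loop 'for k in d: out[k] = f(d[k])' into an empty dict, over distinct fresh keys, is a map.
theorem foldl_dinsert_eq_map {β γ : Type} (f : β → γ) :
    ∀ (l : List (Int × β)) (d : List (Int × γ)),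
      (l.map Prod.fst).Nodup → (∀ k ∈ l.map Prod.fst, k ∉ d.map Prod.fst) →
      l.foldl (fun d p => dinsert d p.1 (f p.2)) d = d ++ l.map (fun p => (p.1, f p.2)) := by
  intro l
  induction l with
  | nil => intro d _ _; simp
  | cons p t ih =>
    intro d hnd hfresh
    simp only [List.map_cons, List.nodup_cons] at hnd
    have hp : p.1 ∉ d.map Prod.fst := hfresh p.1 (by simp)
    simp only [List.foldl_cons]
    rw [dinsert_fresh d p.1 (f p.2) hp,
        ih (d ++ [(p.1, f p.2)]) hnd.2 (by
          intro k hk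
          simp only [List.map_append, List.mem_append, List.map_cons, List.map_nil,
            List.mem_singleton]
          rintro (h | h)
          · exact hfresh k (by simp [hk]) h
          · exact hnd.1 (h ▸ hk))]
    simp

theorem dget?_mem {β : Type} (d : List (Int × β)) (k : Int) (v : β)
    (h : dget? d k = some v) : (k, v) ∈ d := by
  induction d with
  | nil => simp [dget?] at h
  | cons p t ih =>
    obtain ⟨p1, p2⟩ := p
    simp only [dget?] at h
    by_cases e : p1 = k
    · simp only [if_pos e] at h
      injection h with h
      subst e; subst h
      exact List.mem_cons_self
    · simp only [if_neg e] at h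
      exact List.mem_cons_of_mem _ (ih h)

-- A's innermost two fill loops compute copy2 on a dict with distinct keys at both levels.
theorem level2_eq (vu : List (Int × List (Int × List Int)))
    (h : (vu.map Prod.fst).Nodup ∧ ∀ r ∈ vu, (r.2.map Prod.fst).Nodup) :
    vu.foldl (fun d2 nv =>
      dinsert d2 nv.1
        (nv.2.foldl (fun d3 ov => dinsert d3 ov.1 (PySem.Set.ofList ov.2)) [])) []
      = copy2 vu := by
  rw [foldl_dinsert_eq_map
        (fun vn => vn.foldl (fun d3 ov => dinsert d3 ov.1 (PySem.Set.ofList ov.2)) [])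
        vu [] h.1 (by simp)]
  simp only [List.nil_append, copy2]
  apply List.map_congr_left
  intro r hr
  rw [foldl_dinsert_eq_map (fun vo => PySem.Set.ofList vo) r.2 [] (h.2 r hr) (by simp)]
  simp [copy1]

theorem level3_eq (v : List (Int × List (Int × List (Int × List Int))))
    (h : (v.map Prod.fst).Nodup ∧
         ∀ q ∈ v, (q.2.map Prod.fst).Nodup ∧ ∀ r ∈ q.2, (r.2.map Prod.fst).Nodup) :
    v.foldl (fun d1 mv =>
      dinsert d1 mv.1
        (mv.2.foldl (fun d2 nv =>
           dinsert d2 nv.1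
             (nv.2.foldl (fun d3 ov => dinsert d3 ov.1 (PySem.Set.ofList ov.2)) [])) [])) []
      = copy3 v := by
  rw [foldl_dinsert_eq_map
        (fun vm => vm.foldl (fun d2 nv =>
           dinsert d2 nv.1
             (nv.2.foldl (fun d3 ov => dinsert d3 ov.1 (PySem.Set.ofList ov.2)) [])) [])
        v [] h.1 (by simp)]
  simp only [List.nil_append, copy3]
  apply List.map_congr_left
  intro q hq
  rw [level2_eq q.2 (h.2 q hq)]

theorem top_eq (u : Int) :
    ∀ (parts : List (Int × List (Int × List (Int × List (Int × List Int)))))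
      (res : List (Int × List (Int × List (Int × List (Int × List Int))))),
      (∀ p ∈ parts, (p.2.map Prod.fst).Nodup ∧
        ∀ q ∈ p.2, (q.2.map Prod.fst).Nodup ∧ ∀ r ∈ q.2, (r.2.map Prod.fst).Nodup) →
      parts.foldl (fun res kv =>
        let k := kv.1
        let res1 := if k = u then
            dinsert res k
              (kv.2.foldl (fun d1 mv =>
                 dinsert d1 mv.1
                   (mv.2.foldl (fun d2 nv =>
                      dinsert d2 nv.1
                        (nv.2.foldl (fun d3 ov =>
                           dinsert d3 ov.1 (PySem.Set.ofList ov.2)) [])) [])) [])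
          else res
        match dget? kv.2 u with
        | some vu =>
            dinsert res1 k
              [(u, vu.foldl (fun d2 nv =>
                     dinsert d2 nv.1
                       (nv.2.foldl (fun d3 ov =>
                          dinsert d3 ov.1 (PySem.Set.ofList ov.2)) [])) [])]
        | none => res1) res
      = parts.foldl (fun res kv =>
          let res1 := if kv.1 = u then dinsert res kv.1 (copy3 kv.2) else res
          match dget? kv.2 u with
          | some vu => dinsert res1 kv.1 [(u, copy2 vu)]
          | none => res1) res := by
  intro parts
  induction parts with
  | nil => intro res _; rfl
  | cons kv t ih =>
    intro res h
    have hkv := h kv (by simp)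
    have hstep :
        (let res1 := if kv.1 = u then
            dinsert res kv.1
              (kv.2.foldl (fun d1 mv =>
                 dinsert d1 mv.1
                   (mv.2.foldl (fun d2 nv =>
                      dinsert d2 nv.1
                        (nv.2.foldl (fun d3 ov =>
                           dinsert d3 ov.1 (PySem.Set.ofList ov.2)) [])) [])) [])
          else res
         match dget? kv.2 u with
         | some vu =>
             dinsert res1 kv.1
               [(u, vu.foldl (fun d2 nv =>
                      dinsert d2 nv.1
                        (nv.2.foldl (fun d3 ov =>
                           dinsert d3 ov.1 (PySem.Set.ofList ov.2)) [])) [])]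
         | none => res1)
        = (let res1 := if kv.1 = u then dinsert res kv.1 (copy3 kv.2) else res
           match dget? kv.2 u with
           | some vu => dinsert res1 kv.1 [(u, copy2 vu)]
           | none => res1) := by
      rw [level3_eq kv.2 hkv]
      cases hg : dget? kv.2 u with
      | none => rfl
      | some vu =>
        have hmem := dget?_mem kv.2 u vu hg
        dsimp only
        rw [level2_eq vu (hkv.2 (u, vu) hmem)]
    simp only [List.foldl_cons]
    rw [hstep]
    exact ih _ (fun p hp => h p (List.mem_cons_of_mem _ hp))

-- ===== VERDICT (by name: the statement is the Claim_ definition above) =====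
theorem get_u_parts_spec : Claim_equal_get_u_parts := by
  intro u parts _ hpre
  unfold Spec_get_u_parts get_u_parts get_u_parts_alt
  exact top_eq u parts [] hpre.2
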